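-- pv_equiv track=rewrite | github.com/deshaw/pyflyby | lib/python/pyflyby/_dbg.py | _escape_for_gdb
-- ===== SOURCE A (Python) =====
-- _gdb_safe_chars = (
--     "abcdefghijklmnopqrstuvwxyzABCDEFGHIJKLMNOPQRSTUVWXYZ"
--     r"0123456789,./-_=+:;'[]{}\|`~!@#%^&*()<>? ")
--
-- def _escape_for_gdb(string):
--     """
--     Escape a string to make it safe for passing to gdb.
--     """
--     result = []
--     for char in string:
--         if char in _gdb_safe_chars:
--             result.append(char)
--         else:
--             result.append(r"\0{0:o}".format(ord(char)))
--     return ''.join(result)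
-- ===== SOURCE B (Python) =====
-- _gdb_safe_chars = (
--     "abcdefghijklmnopqrstuvwxyzABCDEFGHIJKLMNOPQRSTUVWXYZ"
--     r"0123456789,./-_=+:;'[]{}\|`~!@#%^&*()<>? ")
--
-- def _escape_for_gdb(string):
--     """
--     Escape a string to make it safe for passing to gdb.
--     """
--     table = {ord(c): (c if c in _gdb_safe_chars else '\\0%o' % ord(c))
--              for c in set(string)}
--     return string.translate(table)
-- ===== Notes on version B (the rewrite author's own statement) =====
-- stated objective: faster
-- what changed: Instead of scanning the string with a per-character membership branch and list-join, B builds a translation table (dict) once over the DISTINCT characters of the input (ord -> itself for safe chars, ord -> octal escape otherwise) and applies it in one str.translate pass.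
import Mathlib
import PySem

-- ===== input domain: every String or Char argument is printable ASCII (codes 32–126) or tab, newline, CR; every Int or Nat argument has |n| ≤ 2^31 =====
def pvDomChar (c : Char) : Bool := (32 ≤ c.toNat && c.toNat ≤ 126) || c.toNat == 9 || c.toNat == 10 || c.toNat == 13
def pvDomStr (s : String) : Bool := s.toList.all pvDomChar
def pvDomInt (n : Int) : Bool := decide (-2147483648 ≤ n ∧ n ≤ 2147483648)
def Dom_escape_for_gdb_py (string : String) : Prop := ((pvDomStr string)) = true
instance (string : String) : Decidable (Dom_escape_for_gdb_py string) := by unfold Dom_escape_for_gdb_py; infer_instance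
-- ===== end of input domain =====

-- ===== PORT A =====
-- B replaces A's per-occurrence loop/branch with a translation table built once over
-- the DISTINCT characters of the input and a single str.translate pass; same output.

-- octal digits of n (= Python "{0:o}".format(n) / "%o" % n for n >= 0); shared by both ports
def pvOctChars (n : Nat) : List Char :=
  if h : n < 8 then [Char.ofNat (48 + n)]
  else pvOctChars (n / 8) ++ [Char.ofNat (48 + n % 8)]
decreasing_by exact Nat.div_lt_self (by omega) (by omega)

def pvGdbSafeChars : String :=
  "abcdefghijklmnopqrstuvwxyzABCDEFGHIJKLMNOPQRSTUVWXYZ0123456789,./-_=+:;'[]{}\\|`~!@#%^&*()<>? "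

def escape_for_gdb_py (string : String) : String :=
  -- result = []; for char in string: append char or "\0{0:o}".format(ord(char)); ''.join(result)
  let result : List String := string.toList.foldl (fun acc char =>
    -- 'char in _gdb_safe_chars': for a single char this is exactly list membership
    if pvGdbSafeChars.toList.contains char then acc ++ [String.mk [char]]
    else acc ++ [String.mk ('\\' :: '0' :: pvOctChars char.toNat)]) []
  PySem.Str.join "" result

-- ===== PORT B =====
-- table = {ord(c): (c if c in _gdb_safe_chars else '\0%o' % ord(c)) for c in set(string)}
-- Iteration order over set(string) does not matter: the dict has one entry per distinct
-- character and is only looked up afterwards (str.translate).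
def escape_for_gdb_py_alt (string : String) : String :=
  let table : PySem.Dict Nat (List Char) :=
    (PySem.Set.ofList string.toList).foldl (fun d c =>
      d.insert c.toNat
        (if PySem.Set.contains (PySem.Set.ofList pvGdbSafeChars.toList) c then [c]
         else '\\' :: '0' :: pvOctChars c.toNat)) PySem.Dict.empty
  -- string.translate(table): each char is replaced by table[ord(c)], kept if absent
  String.mk (string.toList.flatMap (fun c =>
    match table.get? c.toNat with
    | some r => r
    | none => [c]))

-- ===== PRECONDITION & SPEC =====
def Spec_escape_for_gdb_py (string : String) (out : String) : Prop := out = escape_for_gdb_py_alt string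
instance (string : String) (out : String) : Decidable (Spec_escape_for_gdb_py string out) := by unfold Spec_escape_for_gdb_py; infer_instance

-- ===== CLAIM (what is proved, stated in full; the proofs are below) =====
def Claim_equal_escape_for_gdb_py : Prop := ∀ (string : String), Dom_escape_for_gdb_py string → Spec_escape_for_gdb_py string (escape_for_gdb_py string)

-- ===== LEMMAS AND PROOFS =====

-- the per-character replacement both programs agree on
def pvItem (c : Char) : List Char :=
  if PySem.Set.contains (PySem.Set.ofList pvGdbSafeChars.toList) c then [c]
  else '\\' :: '0' :: pvOctChars c.toNat

def pvIns (d : PySem.Dict Nat (List Char)) (c : Char) : PySem.Dict Nat (List Char) :=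
  d.insert c.toNat (pvItem c)

lemma pv_char_toNat_inj {a b : Char} (h : a.toNat = b.toNat) : a = b := by
  apply Char.ext; exact UInt32.toNat_inj.mp h

lemma pv_get?_foldl_ne (t : List Char) (d : PySem.Dict Nat (List Char)) (x : Char)
    (h : ∀ y ∈ t, y ≠ x) : (t.foldl pvIns d).get? x.toNat = d.get? x.toNat := by
  induction t generalizing d with
  | nil => rfl
  | cons a r ih =>
    have hne : x.toNat ≠ a.toNat := fun he => h a List.mem_cons_self (pv_char_toNat_inj he.symm)
    rw [List.foldl_cons, ih (pvIns d a) (fun y hy => h y (List.mem_cons_of_mem a hy))]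
    exact PySem.Dict.get?_insert_of_ne d (pvItem a) hne

lemma pv_get?_foldl_mem (L : List Char) (d : PySem.Dict Nat (List Char)) (x : Char)
    (hx : x ∈ L) : (L.foldl pvIns d).get? x.toNat = some (pvItem x) := by
  induction L generalizing d with
  | nil => cases hx
  | cons a r ih =>
    rw [List.foldl_cons]
    by_cases hr : x ∈ r
    · exact ih (pvIns d a) hr
    · have hax : x = a := by
        rcases List.mem_cons.mp hx with h | h
        · exact h
        · exact absurd h hr
      subst hax
      rw [pv_get?_foldl_ne r (pvIns d x) x (fun y hy hyx => hr (hyx ▸ hy))]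
      exact PySem.Dict.get?_insert_self d x.toNat (pvItem x)

lemma pv_toList_mk (cs : List Char) : (String.mk cs).toList = cs :=
  Eq.symm (String.ofList_eq.mp rfl)

-- B's translate pass computes pvItem on every character of the string
lemma pv_alt_eq (s : String) :
    escape_for_gdb_py_alt s = String.mk (s.toList.flatMap pvItem) := by
  unfold escape_for_gdb_py_alt
  have hIns : (fun (d : PySem.Dict Nat (List Char)) c =>
      d.insert c.toNat
        (if PySem.Set.contains (PySem.Set.ofList pvGdbSafeChars.toList) c then [c]
         else '\\' :: '0' :: pvOctChars c.toNat)) = pvIns := rfl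
  rw [hIns]
  refine congrArg String.mk ?_
  apply List.flatMap_congr
  intro c hc
  rw [pv_get?_foldl_mem (PySem.Set.ofList s.toList) PySem.Dict.empty c
    ((PySem.Set.mem_ofList _ _).2 hc)]

-- A's per-character item equals pvItem (list membership = set membership)
lemma pv_item_eq (c : Char) :
    (if pvGdbSafeChars.toList.contains c then String.mk [c]
     else String.mk ('\\' :: '0' :: pvOctChars c.toNat)) = String.mk (pvItem c) := by
  unfold pvItem
  by_cases h : c ∈ pvGdbSafeChars.toList
  · simp [h]
  · simp [h]

lemma pv_join_flatten (L : List (List Char)) : PySem.Chars.join [] L = L.flatten := by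
  induction L with
  | nil => simp [PySem.Chars.join_nil]
  | cons a t ih =>
    cases t with
    | nil => simp [PySem.Chars.join_singleton]
    | cons b r => rw [PySem.Chars.join_cons_cons]; simp_all

-- A's loop/join computes the same flatMap
lemma pv_a_eq (s : String) :
    escape_for_gdb_py s = String.mk (s.toList.flatMap pvItem) := by
  unfold escape_for_gdb_py
  apply String.ext
  rw [PySem.Str.toList_join]
  have hf : (fun (acc : List String) c =>
      if pvGdbSafeChars.toList.contains c then acc ++ [String.mk [c]]
      else acc ++ [String.mk ('\\' :: '0' :: pvOctChars c.toNat)]) =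
      (fun acc c => acc ++ [String.mk (pvItem c)]) := by
    funext acc c; rw [← pv_item_eq c]; split <;> rfl
  rw [hf, PySem.List.foldl_append_eq_flatMap, List.nil_append]
  have hm : ∀ (m : List Char),
      List.map String.toList (List.flatMap (fun c => [String.mk (pvItem c)]) m) =
      m.map pvItem := by
    intro m; induction m with
    | nil => rfl
    | cons a t ih =>
      rw [List.flatMap_cons, List.map_append, ih, List.map_cons, List.map_nil,
        List.singleton_append, pv_toList_mk, List.map_cons]
  rw [hm, show ("" : String).toList = [] from rfl, pv_join_flatten, pv_toList_mk, List.flatMap]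

-- ===== VERDICT (by name: the statement is the Claim_ definition above) =====
theorem escape_for_gdb_py_spec : Claim_equal_escape_for_gdb_py := by
  intro s _
  unfold Spec_escape_for_gdb_py
  rw [pv_a_eq, pv_alt_eq]
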